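-- pv_equiv track=rewrite | github.com/Jake-Duffy855/scrabble-bot | scrabble.py | substring_in_order
-- ===== SOURCE A (Python) =====
-- def substring_in_order(word: str, sub: str) -> bool:
--     """
--     Does word have all the letters of sub in the order they appear in sub
--     :param word: the word to check the contents of
--     :param sub: the letters word must contain
--     :return: True if word contains all the letters of sub in order, False otherwise
--     """
--     index = 0
--     for char in sub.upper():
--         if char == "?":
--             index += 1
--         else:
--             try:
--                 index = word.index(char, index)
--             except ValueError:
--                 return False
--     return True
-- ===== SOURCE B (Python) =====
-- def _first_at_least(occ, lo):
--     """index of the first element of sorted list occ that is >= lo (== len(occ) if none)."""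
--     a, b = 0, len(occ)
--     while a < b:
--         m = (a + b) // 2
--         if occ[m] < lo:
--             a = m + 1
--         else:
--             b = m
--     return a
--
--
-- def substring_in_order(word: str, sub: str) -> bool:
--     """
--     Does word have all the letters of sub in the order they appear in sub.
--     Index version: one scan of word builds per-character occurrence lists,
--     then each letter of sub is resolved by binary search over its list.
--     """
--     positions = {}
--     for i, ch in enumerate(word):
--         positions.setdefault(ch, []).append(i)
--     pointer = 0
--     for char in sub.upper():
--         if char == "?":
--             pointer += 1
--         else:
--             occ = positions.get(char, [])
--             j = _first_at_least(occ, pointer)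
--             if j == len(occ):
--                 return False
--             pointer = occ[j]
--     return True
-- ===== Notes on version B (the rewrite author's own statement) =====
-- stated objective: alternative
-- what changed: Instead of repeatedly scanning word left-to-right with str.index, B builds per-character occurrence-position lists in one pass over word and resolves each letter of sub by binary search over its list.
import Mathlib
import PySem

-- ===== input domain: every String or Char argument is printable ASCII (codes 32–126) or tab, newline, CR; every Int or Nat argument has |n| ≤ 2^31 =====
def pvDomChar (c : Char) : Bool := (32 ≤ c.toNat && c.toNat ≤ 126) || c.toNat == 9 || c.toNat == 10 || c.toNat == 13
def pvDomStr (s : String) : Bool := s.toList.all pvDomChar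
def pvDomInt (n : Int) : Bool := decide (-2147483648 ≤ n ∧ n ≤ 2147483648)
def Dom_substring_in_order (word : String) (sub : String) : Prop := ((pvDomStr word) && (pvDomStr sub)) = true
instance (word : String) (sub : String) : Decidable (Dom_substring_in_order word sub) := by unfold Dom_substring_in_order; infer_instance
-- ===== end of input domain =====

-- B replaces A's repeated left-to-right word.index scans by per-character occurrence
-- lists built in one pass over word, each letter of sub then resolved by binary search.

-- ===== PORT A =====
-- literal port of A: pointer `index`, word.index(char, index) = Str.findFrom
-- (result -1 = ValueError → return False, modelled by the absorbing `none` state)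
def substring_in_order (word : String) (sub : String) : Bool :=
  ((PySem.Str.upper sub).toList.foldl
    (fun st char =>
      match st with
      | none => none
      | some index =>
        if char = '?' then some (index + 1)
        else
          let r := PySem.Str.findFrom word (String.ofList [char]) index none
          if r = -1 then none else some r)
    (some (0 : Int))).isSome

-- ===== PORT B =====
-- Source B's _first_at_least: first index j in [a, b) with occ[j] >= lo (b if none);
-- occ[m] is in range whenever taken (m < b ≤ len occ), so pyGetD is exact here
def firstAtLeast (occ : List Int) (lo : Int) (a b : Nat) : Nat :=
  if a < b then
    let m := (a + b) / 2
    if PySem.List.pyGetD occ (m : Int) 0 < lo then firstAtLeast occ lo (m + 1) b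
    else firstAtLeast occ lo a m
  else a
termination_by b - a
decreasing_by all_goals omega

def substring_in_order_alt (word : String) (sub : String) : Bool :=
  let positions : PySem.Dict Char (List Int) :=
    (PySem.List.enumerate word.toList 0).foldl
      (fun d p => d.modify p.2 [] (· ++ [p.1])) PySem.Dict.empty
  ((PySem.Str.upper sub).toList.foldl
    (fun st char =>
      match st with
      | none => none
      | some pointer =>
        if char = '?' then some (pointer + 1)
        else
          let occ := positions.getD char []
          let j := firstAtLeast occ pointer 0 occ.length
          if j = occ.length then none else some (PySem.List.pyGetD occ (j : Int) 0))
    (some (0 : Int))).isSome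

-- ===== PRECONDITION & SPEC =====
def Spec_substring_in_order (word : String) (sub : String) (out : Bool) : Prop := out = substring_in_order_alt word sub
instance (word : String) (sub : String) (out : Bool) : Decidable (Spec_substring_in_order word sub out) := by unfold Spec_substring_in_order; infer_instance

-- ===== CLAIM (what is proved, stated in full; the proofs are below) =====
def Claim_equal_substring_in_order : Prop := ∀ (word : String) (sub : String), Dom_substring_in_order word sub → Spec_substring_in_order word sub (substring_in_order word sub)

-- ===== LEMMAS AND PROOFS =====

-- A's loop body and B's loop body, named for the proofs (definitionally the ports' lambdas)
def stepA (word : String) (st : Option Int) (char : Char) : Option Int :=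
  match st with
  | none => none
  | some index =>
    if char = '?' then some (index + 1)
    else
      let r := PySem.Str.findFrom word (String.ofList [char]) index none
      if r = -1 then none else some r

def stepB (word : String) (st : Option Int) (char : Char) : Option Int :=
  match st with
  | none => none
  | some pointer =>
    if char = '?' then some (pointer + 1)
    else
      let occ := ((PySem.List.enumerate word.toList 0).foldl
        (fun d p => d.modify p.2 [] (· ++ [p.1])) PySem.Dict.empty).getD char []
      let j := firstAtLeast occ pointer 0 occ.length
      if j = occ.length then none else some (PySem.List.pyGetD occ (j : Int) 0)

-- the (strictly increasing) list of positions of c in cs, as B's dict stores it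
def occList (cs : List Char) (c : Char) : List Int :=
  ((PySem.List.enumerate cs 0).filter (fun p => p.2 == c)).map (·.1)

lemma positions_getD (cs : List Char) (c : Char) :
    ((PySem.List.enumerate cs 0).foldl
      (fun d p => d.modify p.2 [] (· ++ [p.1])) PySem.Dict.empty).getD c []
    = occList cs c := by
  have h : (PySem.List.enumerate cs 0).foldl
      (fun d p => d.modify p.2 [] (· ++ [p.1])) (PySem.Dict.empty : PySem.Dict Char (List Int))
      = ((PySem.List.enumerate cs 0).map Prod.swap).foldl
      (fun d q => d.modify q.1 [] (· ++ [q.2])) PySem.Dict.empty := by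
    rw [List.foldl_map]; rfl
  rw [h, PySem.Dict.getD_foldl_modify_append, List.filter_map, List.map_map]
  simp only [PySem.Dict.getD_empty, List.nil_append, occList]
  congr 1

lemma mem_occList (cs : List Char) (c : Char) (x : Int) :
    x ∈ occList cs c ↔ ∃ k, ∃ _ : k < cs.length, x = (k : Int) ∧ cs[k] = c := by
  simp only [occList, List.mem_map, List.mem_filter, PySem.List.mem_enumerate_iff]
  constructor
  · rintro ⟨p, ⟨⟨k, hk, rfl⟩, hc⟩, rfl⟩
    exact ⟨k, hk, by simpa using hc⟩
  · rintro ⟨k, hk, rfl, hc⟩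
    exact ⟨((k : Int), cs[k]), ⟨⟨k, hk, by simp⟩, by simpa using hc⟩, rfl⟩

lemma occList_sorted (cs : List Char) (c : Char) : (occList cs c).Pairwise (· < ·) :=
  ((PySem.List.pairwise_lt_enumerate cs 0).filter _).map _ (fun _ _ h => h)

lemma firstAtLeast_spec (occ : List Int) (lo : Int)
    (hs : occ.Pairwise (· < ·)) (a b : Nat)
    (hab : a ≤ b) (hb : b ≤ occ.length)
    (hlow : ∀ k (h : k < occ.length), k < a → occ[k] < lo)
    (hhigh : ∀ k (h : k < occ.length), b ≤ k → lo ≤ occ[k]) :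
    a ≤ firstAtLeast occ lo a b ∧ firstAtLeast occ lo a b ≤ b ∧
    (∀ k (h : k < occ.length), k < firstAtLeast occ lo a b → occ[k] < lo) ∧
    (∀ k (h : k < occ.length), firstAtLeast occ lo a b ≤ k → lo ≤ occ[k]) := by
  have hmono : ∀ i j (hi : i < occ.length) (hj : j < occ.length), i ≤ j → occ[i] ≤ occ[j] := by
    intro i j hi hj hij
    rcases Nat.lt_or_ge i j with h' | h'
    · exact le_of_lt ((List.pairwise_iff_getElem.mp hs) i j hi hj h')
    · have : i = j := by omega
      subst this; exact le_refl _
  clear hs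
  fun_induction firstAtLeast occ lo a b with
  | case1 a b h m hm ih =>
    have hmlen : m < occ.length := by omega
    have hocc : PySem.List.pyGetD occ (m : Int) 0 = occ[m] := by
      rw [PySem.List.pyGetD_natCast]; exact List.getD_eq_getElem _ _ hmlen
    rw [hocc] at hm
    obtain ⟨i1, i2, i3, i4⟩ := ih (by omega) hb
      (fun k hk hka => lt_of_le_of_lt (hmono k m hk hmlen (by omega)) hm)
      hhigh
    exact ⟨by omega, i2, i3, i4⟩
  | case2 a b h m hm ih =>
    have hmlen : m < occ.length := by omega
    have hocc : PySem.List.pyGetD occ (m : Int) 0 = occ[m] := by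
      rw [PySem.List.pyGetD_natCast]; exact List.getD_eq_getElem _ _ hmlen
    rw [hocc] at hm
    push Not at hm
    obtain ⟨i1, i2, i3, i4⟩ := ih (by omega) (by omega) hlow
      (fun k hk hka => le_trans hm (hmono m k hmlen hk (by omega)))
    exact ⟨i1, by omega, i3, i4⟩
  | case3 a b h =>
    exact ⟨le_refl _, by omega, fun k hk hka => hlow k hk (by omega),
      fun k hk hka => hhigh k hk (by omega)⟩

lemma singleton_prefix_iff (c : Char) (l : List Char) : [c] <+: l ↔ ∃ t, l = c :: t := by
  constructor
  · rintro ⟨t, rfl⟩; exact ⟨t, rfl⟩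
  · rintro ⟨t, rfl⟩; exact ⟨t, rfl⟩

lemma singleton_prefix_drop_iff (cs : List Char) (c : Char) (j : Nat) :
    [c] <+: cs.drop j ↔ ∃ h : j < cs.length, cs[j] = c := by
  rw [singleton_prefix_iff]
  constructor
  · rintro ⟨t, ht⟩
    have hj : j < cs.length := by
      by_contra hc
      rw [List.drop_eq_nil_of_le (by omega)] at ht
      exact List.cons_ne_nil _ _ ht.symm
    refine ⟨hj, ?_⟩
    have h0 : 0 < (List.drop j cs).length := by rw [ht]; simp
    have hgd := List.getElem_drop (xs := cs) (i := j) (j := 0) (h := h0)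
    have hc0 : (List.drop j cs)[0]'h0 = c := by simp [ht]
    rw [hgd] at hc0
    simpa using hc0
  · rintro ⟨hj, hc⟩
    refine ⟨cs.drop (j+1), ?_⟩
    rw [← hc]
    exact (List.drop_eq_getElem_cons hj)

-- A's word.index(c, i) characterised against the occurrence list
lemma findFrom_eq_occ (cs : List Char) (c : Char) (i : Int) (hi : 0 ≤ i) :
    (PySem.Chars.findFrom cs [c] i none = -1 ↔ ∀ x ∈ occList cs c, x < i) ∧
    (PySem.Chars.findFrom cs [c] i none ≠ -1 →
      PySem.Chars.findFrom cs [c] i none ∈ occList cs c ∧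
      i ≤ PySem.Chars.findFrom cs [c] i none ∧
      ∀ x ∈ occList cs c, i ≤ x → PySem.Chars.findFrom cs [c] i none ≤ x) := by
  rcases le_or_gt i (cs.length : Int) with hle | hgt
  · have hk : i.toNat ≤ cs.length := by omega
    have hcast : ((i.toNat : Nat) : Int) = i := Int.toNat_of_nonneg hi
    rw [← hcast]
    constructor
    · rw [PySem.Chars.findFrom_natCast_eq_neg_one_iff cs [c] i.toNat hk,
        List.singleton_infix_iff]
      constructor
      · intro hnm x hx
        rw [mem_occList] at hx
        obtain ⟨k, hklen, rfl, hc⟩ := hx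
        by_contra hcon
        push Not at hcon
        have hki : i.toNat ≤ k := by omega
        apply hnm
        rw [List.mem_iff_getElem]
        have hdl : (List.drop i.toNat cs).length = cs.length - i.toNat := List.length_drop
        exact ⟨k - i.toNat, by omega, by rw [List.getElem_drop]; exact (getElem_congr rfl (by omega) (by omega)).trans hc⟩
      · intro hall hmem
        rw [List.mem_iff_getElem] at hmem
        obtain ⟨j, hj, hc⟩ := hmem
        have hjlen : i.toNat + j < cs.length := by
          have := List.length_drop (i := i.toNat) (l := cs); omega
        have := hall ((i.toNat + j : Nat) : Int) (by
          rw [mem_occList]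
          exact ⟨i.toNat + j, hjlen, rfl, by rw [← List.getElem_drop (h := hj)]; exact hc⟩)
        omega
    · intro hne
      obtain ⟨h1, h2, h3⟩ := PySem.Chars.findFrom_natCast_spec cs [c] i.toNat hk hne
      set r := PySem.Chars.findFrom cs [c] ((i.toNat : Nat) : Int) with hr
      have hr0 : 0 ≤ r := le_trans (by omega) h1
      rw [singleton_prefix_drop_iff] at h2
      obtain ⟨hrlen, hrc⟩ := h2
      have hrcast : ((r.toNat : Nat) : Int) = r := Int.toNat_of_nonneg hr0
      refine ⟨?_, h1, ?_⟩
      · rw [mem_occList]; exact ⟨r.toNat, hrlen, hrcast.symm, hrc⟩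
      · intro x hx hix
        rw [mem_occList] at hx
        obtain ⟨k, hklen, rfl, hc⟩ := hx
        by_contra hcon
        push Not at hcon
        have hkr : k < r.toNat := by omega
        have hik : i.toNat ≤ k := by omega
        exact h3 k hik hkr ((singleton_prefix_drop_iff cs c k).mpr ⟨hklen, hc⟩)
  · have hneg : PySem.Chars.findFrom cs [c] i none = -1 := by
      unfold PySem.Chars.findFrom
      simp only
      rw [if_neg (by omega : ¬ i < 0)] at *
      rw [if_pos (by omega : ((cs.length : Int)) < i)]
    rw [hneg]
    refine ⟨⟨fun _ x hx => ?_, fun _ => rfl⟩, fun h => absurd rfl h⟩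
    rw [mem_occList] at hx
    obtain ⟨k, hklen, rfl, _⟩ := hx
    omega

-- one loop step of A equals one loop step of B and keeps the pointer nonnegative
lemma step_eq (word : String) (char : Char) (i : Int) (hi : 0 ≤ i) :
    stepA word (some i) char = stepB word (some i) char ∧
    ∀ r : Int, stepA word (some i) char = some r → 0 ≤ r := by
  by_cases hq : char = '?'
  · simp [stepA, stepB, hq]
    omega
  · simp only [stepA, stepB, if_neg hq, positions_getD]
    have hfs : PySem.Str.findFrom word (String.ofList [char]) i none
        = PySem.Chars.findFrom word.toList [char] i none := by
      rw [PySem.Str.findFrom_eq]; simp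
    obtain ⟨hiff, hspec⟩ := findFrom_eq_occ word.toList char i hi
    rw [← hfs] at hiff hspec
    set occ := occList word.toList char with hocc
    obtain ⟨j1, j2, j3, j4⟩ := firstAtLeast_spec occ i (occList_sorted _ _) 0 occ.length
      (by omega) (le_refl _) (fun k hk hka => by omega) (fun k hk hka => by omega)
    set j := firstAtLeast occ i 0 occ.length with hj
    set r := PySem.Str.findFrom word (String.ofList [char]) i none with hr
    rcases Nat.lt_or_ge j occ.length with hjlen | hjlen
    · -- found: both return the first occurrence ≥ i
      have hje : occ[j] ∈ occ := List.getElem_mem _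
      have hji : i ≤ occ[j] := j4 j hjlen (le_refl _)
      have hrne : r ≠ -1 := by
        intro hcon
        have := (hiff.mp hcon) occ[j] hje
        omega
      obtain ⟨hrmem, hri, hrmin⟩ := hspec hrne
      have h1 : r ≤ occ[j] := hrmin occ[j] hje hji
      have h2 : occ[j] ≤ r := by
        rw [List.mem_iff_getElem] at hrmem
        obtain ⟨k, hk, hkr⟩ := hrmem
        have hkj : j ≤ k := by
          by_contra hcon
          have := j3 k hk (by omega)
          omega
        calc occ[j] ≤ occ[k] := by
              rcases Nat.lt_or_ge j k with h' | h'
              · exact le_of_lt (List.pairwise_iff_getElem.mp (occList_sorted _ _) j k hjlen hk h')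
              · exact le_of_eq (getElem_congr rfl (by omega) _)
          _ = r := hkr
      have hrj : r = occ[j] := le_antisymm h1 h2
      rw [if_neg hrne, if_neg (by omega : ¬ j = occ.length)]
      constructor
      · rw [hrj, PySem.List.pyGetD_natCast, List.getD_eq_getElem _ _ hjlen]
      · intro v hv
        injection hv with hv
        omega
    · -- not found: every occurrence is < i, A's index raises ValueError
      have hre : r = -1 := hiff.mpr (fun x hx => by
        rw [List.mem_iff_getElem] at hx
        obtain ⟨k, hk, hkx⟩ := hx
        have := j3 k hk (by omega)
        omega)
      rw [if_pos hre, if_pos (by omega : j = occ.length)]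
      exact ⟨rfl, fun v hv => by cases hv⟩

lemma foldl_stepA_none (word : String) (l : List Char) :
    l.foldl (stepA word) none = none := by
  induction l with
  | nil => rfl
  | cons c t ih => simpa [stepA] using ih

lemma foldl_stepB_none (word : String) (l : List Char) :
    l.foldl (stepB word) none = none := by
  induction l with
  | nil => rfl
  | cons c t ih => simpa [stepB] using ih

lemma foldl_step_eq (word : String) (l : List Char) (i : Int) (hi : 0 ≤ i) :
    l.foldl (stepA word) (some i) = l.foldl (stepB word) (some i) := by
  induction l generalizing i with
  | nil => rfl
  | cons c t ih =>
    obtain ⟨heq, hnn⟩ := step_eq word c i hi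
    simp only [List.foldl_cons, heq]
    cases hA : stepA word (some i) c with
    | none => rw [← heq, hA, foldl_stepA_none, foldl_stepB_none]
    | some v => rw [← heq, hA, ih v (hnn v hA)]

-- ===== VERDICT (by name: the statement is the Claim_ definition above) =====
theorem substring_in_order_spec : Claim_equal_substring_in_order := by
  intro word sub _
  show substring_in_order word sub = substring_in_order_alt word sub
  show ((PySem.Str.upper sub).toList.foldl (stepA word) (some 0)).isSome
    = ((PySem.Str.upper sub).toList.foldl (stepB word) (some 0)).isSome
  rw [foldl_step_eq word _ 0 (le_refl _)]
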